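-- pv_equiv track=rewrite | github.com/jjoshua2/arc_agi | unsolved/2025-10-01T04-50-40Z/4612dd53_best1.py | transform
-- ===== SOURCE A (Python) =====
-- def transform(grid: list[list[int]]) -> list[list[int]]:
--     if not grid or not grid[0]:
--         return []
--     rows = len(grid)
--     cols = len(grid[0])
--     output = [row[:] for row in grid]
--     # Horizontal fills: in each row, fill gaps between consecutive 1s
--     for r in range(rows):
--         positions = [c for c in range(cols) if grid[r][c] == 1]
--         for i in range(len(positions) - 1):
--             start_c = positions[i] + 1
--             end_c = positions[i + 1] - 1
--             for c in range(start_c, end_c + 1):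
--                 output[r][c] = 2
--     # Vertical fills: in each column, fill gaps between consecutive 1s
--     for c in range(cols):
--         positions = [r for r in range(rows) if grid[r][c] == 1]
--         for i in range(len(positions) - 1):
--             start_r = positions[i] + 1
--             end_r = positions[i + 1] - 1
--             for r in range(start_r, end_r + 1):
--                 output[r][c] = 2
--     return output
-- ===== SOURCE B (Python) =====
-- def transform(grid: list[list[int]]) -> list[list[int]]:
--     if not grid or not grid[0]:
--         return []
--     rows, cols = len(grid), len(grid[0])
--     row_span = []
--     for row in grid:
--         ones = [c for c in range(cols) if row[c] == 1]
--         row_span.append((ones[0], ones[-1]) if ones else None)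
--     col_span = []
--     for c in range(cols):
--         ones = [r for r in range(rows) if grid[r][c] == 1]
--         col_span.append((ones[0], ones[-1]) if ones else None)
--     out = []
--     for r, row in enumerate(grid):
--         new = list(row)
--         for c in range(cols):
--             if row[c] != 1:
--                 rs, cs = row_span[r], col_span[c]
--                 if (rs is not None and rs[0] < c < rs[1]) or (cs is not None and cs[0] < r < cs[1]):
--                     new[c] = 2
--         out.append(new)
--     return out
-- ===== Notes on version B (the rewrite author's own statement) =====
-- stated objective: alternative
-- what changed: A fills the gap between every consecutive pair of 1s with a triple-nested loop over pair indices; B computes one (first,last) 1-span per row and per column and decides each cell with a single 'not 1 and strictly inside a span' test.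
import Mathlib
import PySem

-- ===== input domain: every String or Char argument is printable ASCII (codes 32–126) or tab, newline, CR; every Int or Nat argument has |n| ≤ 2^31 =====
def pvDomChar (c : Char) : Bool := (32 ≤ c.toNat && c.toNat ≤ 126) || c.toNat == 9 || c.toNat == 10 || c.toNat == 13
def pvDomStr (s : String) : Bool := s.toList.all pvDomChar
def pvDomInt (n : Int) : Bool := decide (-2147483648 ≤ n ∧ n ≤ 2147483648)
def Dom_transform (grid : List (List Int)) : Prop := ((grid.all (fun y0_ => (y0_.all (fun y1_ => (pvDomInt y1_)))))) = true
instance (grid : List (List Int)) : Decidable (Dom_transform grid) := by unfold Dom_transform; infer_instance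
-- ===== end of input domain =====

-- B replaces A's per-row/per-column consecutive-pair gap fills with one span (first 1 .. last 1)
-- per row and per column and a per-cell "≠ 1 and strictly inside a span" test (objective: alternative).

-- ===== PORT A =====
-- output[r][c] = 2 (indices are in range on every write A performs under Pre_transform;
-- List.set is a no-op out of range, matching nothing Python does there because Pre_ excludes it)
def pySet2 (m : List (List Int)) (r c : Int) : List (List Int) :=
  m.set r.toNat ((m.getD r.toNat []).set c.toNat 2)

-- [c for c in range(cols) if row[c] == 1]
def onesRow (row : List Int) (cols : Int) : List Int :=
  (PySem.List.pyRange 0 cols 1).filter (fun c => PySem.List.pyGetD row c 0 == 1)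

-- positions = [c for c in range(cols) if grid[r][c] == 1]
def posRow (grid : List (List Int)) (cols : Int) (r : Int) : List Int :=
  onesRow (PySem.List.pyGetD grid r []) cols

-- positions = [r for r in range(rows) if grid[r][c] == 1]
def posCol (grid : List (List Int)) (rows : Int) (c : Int) : List Int :=
  (PySem.List.pyRange 0 rows 1).filter (fun r => PySem.List.pyGetD (PySem.List.pyGetD grid r []) c 0 == 1)

-- for i in range(len(positions)-1): for c in range(positions[i]+1, positions[i+1]-1+1): output[r][c] = 2
def fillRowGaps (r : Int) (positions : List Int) (output : List (List Int)) : List (List Int) :=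
  (PySem.List.pyRange 0 ((positions.length : Int) - 1) 1).foldl (fun output i =>
    (PySem.List.pyRange (PySem.List.pyGetD positions i 0 + 1)
        ((PySem.List.pyGetD positions (i + 1) 0 - 1) + 1) 1).foldl
      (fun output c => pySet2 output r c) output) output

-- the symmetric vertical fill
def fillColGaps (c : Int) (positions : List Int) (output : List (List Int)) : List (List Int) :=
  (PySem.List.pyRange 0 ((positions.length : Int) - 1) 1).foldl (fun output i =>
    (PySem.List.pyRange (PySem.List.pyGetD positions i 0 + 1)
        ((PySem.List.pyGetD positions (i + 1) 0 - 1) + 1) 1).foldl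
      (fun output r => pySet2 output r c) output) output

def transform (grid : List (List Int)) : List (List Int) :=
  if grid = [] ∨ grid.headD [] = [] then []
  else
    (PySem.List.pyRange 0 ((grid.headD []).length : Int) 1).foldl
      (fun output c => fillColGaps c (posCol grid (grid.length : Int) c) output)
      ((PySem.List.pyRange 0 (grid.length : Int) 1).foldl
        (fun output r => fillRowGaps r (posRow grid ((grid.headD []).length : Int) r) output)
        (grid.map (fun row => row)))

-- ===== PORT B =====
-- (ones[0], ones[-1]) if ones else None
def spanB (ones : List Int) : Option (Int × Int) :=
  if ones = [] then none
  else some (PySem.List.pyGetD ones 0 0, PySem.List.pyGetD ones (-1) 0)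

-- span is not None and span[0] < i < span[1]
def betweenB (span : Option (Int × Int)) (i : Int) : Bool :=
  match span with
  | none => false
  | some s => decide (s.1 < i) && decide (i < s.2)

-- new = list(row); for c in range(cols): if row[c] != 1 and (between(...) or between(...)): new[c] = 2
def fillCellsB (r : Int) (row : List Int) (rowSpan colSpan : List (Option (Int × Int)))
    (cols : Int) : List Int :=
  (PySem.List.pyRange 0 cols 1).foldl (fun new c =>
    if PySem.List.pyGetD row c 0 ≠ 1 ∧
        (betweenB (PySem.List.pyGetD rowSpan r none) c ∨
         betweenB (PySem.List.pyGetD colSpan c none) r)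
    then new.set c.toNat 2 else new) row

def transform_alt (grid : List (List Int)) : List (List Int) :=
  if grid = [] ∨ grid.headD [] = [] then []
  else
    let rows : Int := grid.length
    let cols : Int := (grid.headD []).length
    let rowSpan := grid.map (fun row => spanB (onesRow row cols))
    let colSpan := (PySem.List.pyRange 0 cols 1).map (fun c => spanB (posCol grid rows c))
    (PySem.List.enumerate grid).map (fun p => fillCellsB p.1 p.2 rowSpan colSpan cols)

-- ===== PRECONDITION & SPEC =====
-- Pre_ excludes exactly the grids on which A raises IndexError: some row shorter than the
-- first row (grid[r][c] is read for every c < len(grid[0])); B raises on exactly the same grids.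
def Pre_transform (grid : List (List Int)) : Prop :=
  ∀ row ∈ grid, (grid.headD []).length ≤ row.length

instance (grid : List (List Int)) : Decidable (Pre_transform grid) := by
  unfold Pre_transform; infer_instance

def pvWitness_transform : List (List Int) := [[1, 0, 1], [0, 1, 0], [1, 0, 1]]

def Spec_transform (grid : List (List Int)) (out : List (List Int)) : Prop := out = transform_alt grid
instance (grid : List (List Int)) (out : List (List Int)) : Decidable (Spec_transform grid out) := by
  unfold Spec_transform; infer_instance

-- ===== CLAIM (what is proved, stated in full; the proofs are below) =====
def Claim_equal_transform : Prop :=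
  ∀ (grid : List (List Int)), Dom_transform grid → Pre_transform grid →
    Spec_transform grid (transform grid)

-- ===== LEMMAS AND PROOFS =====

-- the value of cell (r, c) of a nested list, with Python-irrelevant defaults out of range
def cellv (m : List (List Int)) (r c : Nat) : Int := (m.getD r []).getD c 0

-- m has the same outer length and the same row lengths as g
def ShapeEq (g m : List (List Int)) : Prop :=
  m.length = g.length ∧ ∀ j : Nat, (m.getD j []).length = (g.getD j []).length

theorem shapeEq_refl (g : List (List Int)) : ShapeEq g g := ⟨rfl, fun _ => rfl⟩

-- the write condition of a single output[r][c] = 2 (in-shape indices)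
abbrev WSet (g : List (List Int)) (r c : Int) (r' c' : Nat) : Prop :=
  r' = r.toNat ∧ c' = c.toNat ∧ r.toNat < g.length ∧ c.toNat < (g.getD r.toNat []).length

-- the cells written by A's inner two loops for one row r / one column c
abbrev WFillRow (g : List (List Int)) (r : Int) (P : List Int) (r' c' : Nat) : Prop :=
  ∃ i ∈ PySem.List.pyRange 0 ((P.length : Int) - 1) 1,
    ∃ c ∈ PySem.List.pyRange (PySem.List.pyGetD P i 0 + 1)
        ((PySem.List.pyGetD P (i + 1) 0 - 1) + 1) 1, WSet g r c r' c'

abbrev WFillCol (g : List (List Int)) (c : Int) (P : List Int) (r' c' : Nat) : Prop :=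
  ∃ i ∈ PySem.List.pyRange 0 ((P.length : Int) - 1) 1,
    ∃ r ∈ PySem.List.pyRange (PySem.List.pyGetD P i 0 + 1)
        ((PySem.List.pyGetD P (i + 1) 0 - 1) + 1) 1, WSet g r c r' c'

-- the cells written by A's horizontal / vertical pass
abbrev CAh (g : List (List Int)) (r' c' : Nat) : Prop :=
  ∃ r ∈ PySem.List.pyRange 0 (g.length : Int) 1,
    WFillRow g r (posRow g ((g.headD []).length : Int) r) r' c'

abbrev CAv (g : List (List Int)) (r' c' : Nat) : Prop :=
  ∃ c ∈ PySem.List.pyRange 0 ((g.headD []).length : Int) 1,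
    WFillCol g c (posCol g (g.length : Int) c) r' c'

theorem getD_set {α : Type} [Inhabited α] (l : List α) (i j : Nat) (a d : α) :
    (l.set i a).getD j d = if j = i ∧ i < l.length then a else l.getD j d := by
  simp [List.getD_eq_getElem?_getD, List.getElem?_set]
  split_ifs <;> simp_all

theorem pySet2_shape (g m : List (List Int)) (r c : Int) (h : ShapeEq g m) :
    ShapeEq g (pySet2 m r c) := by
  obtain ⟨h1, h2⟩ := h
  refine ⟨by simp [pySet2, h1], fun j => ?_⟩
  rw [pySet2, getD_set]
  split_ifs with hj
  · have := h2 r.toNat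
    simp only [List.getD_eq_getElem?_getD] at this
    simp [hj.1, this]
  · exact h2 j

theorem cellv_pySet2 (g m : List (List Int)) (r c : Int) (r' c' : Nat) (h : ShapeEq g m) :
    cellv (pySet2 m r c) r' c' =
      if WSet g r c r' c' then 2 else cellv m r' c' := by
  unfold WSet
  obtain ⟨h1, h2⟩ := h
  rw [cellv, pySet2, getD_set]
  have hrl := h2 r.toNat
  split_ifs with hj hc hc
  · rw [getD_set]
    split_ifs with hk
    · rfl
    · exfalso; exact hk ⟨hc.2.1.symm ▸ hc.2.1 ▸ rfl, by omega⟩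
  · rw [getD_set]
    split_ifs with hk
    · exfalso; exact hc ⟨hj.1, hk.1, by omega, by omega⟩
    · simp [cellv, hj.1]
  · exfalso; exact hj ⟨hc.1, by omega⟩
  · rfl

theorem shape_foldl {ι : Type} (g : List (List Int)) (step : List (List Int) → ι → List (List Int))
    (hstep : ∀ m i, ShapeEq g m → ShapeEq g (step m i)) :
    ∀ (L : List ι) (m : List (List Int)), ShapeEq g m → ShapeEq g (L.foldl step m) := by
  intro L
  induction L with
  | nil => intro m h; exact h
  | cons i L ih => intro m h; exact ih _ (hstep m i h)

theorem cellv_foldl {ι : Type} (g : List (List Int)) (step : List (List Int) → ι → List (List Int))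
    (W : ι → Nat → Nat → Prop) [inst : ∀ i r c, Decidable (W i r c)]
    (hshape : ∀ m i, ShapeEq g m → ShapeEq g (step m i))
    (hstep : ∀ m i r c, ShapeEq g m → cellv (step m i) r c = if W i r c then 2 else cellv m r c) :
    ∀ (L : List ι) (m : List (List Int)) (r c : Nat), ShapeEq g m →
      cellv (L.foldl step m) r c = if ∃ i ∈ L, W i r c then 2 else cellv m r c := by
  intro L
  induction L with
  | nil => intro m r c h; simp
  | cons i L ih =>
    intro m r c h
    rw [List.foldl_cons, ih _ r c (hshape m i h), hstep m i r c h]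
    by_cases h1 : W i r c <;> by_cases h2 : ∃ j ∈ L, W j r c <;>
      simp [h1, h2]

theorem fillRowGaps_shape (g m : List (List Int)) (r : Int) (P : List Int) (h : ShapeEq g m) :
    ShapeEq g (fillRowGaps r P m) :=
  shape_foldl g _
    (fun m' _ hm' => shape_foldl g _ (fun m'' c hm'' => pySet2_shape g m'' r c hm'') _ m' hm')
    _ m h

theorem fillColGaps_shape (g m : List (List Int)) (c : Int) (P : List Int) (h : ShapeEq g m) :
    ShapeEq g (fillColGaps c P m) :=
  shape_foldl g _
    (fun m' _ hm' => shape_foldl g _ (fun m'' r hm'' => pySet2_shape g m'' r c hm'') _ m' hm')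
    _ m h

theorem cellv_fillRowGaps (g m : List (List Int)) (r : Int) (P : List Int) (r' c' : Nat)
    (h : ShapeEq g m) :
    cellv (fillRowGaps r P m) r' c' = if WFillRow g r P r' c' then 2 else cellv m r' c' := by
  unfold fillRowGaps
  exact cellv_foldl g _
    (fun i rr cc => ∃ c ∈ PySem.List.pyRange (PySem.List.pyGetD P i 0 + 1)
        ((PySem.List.pyGetD P (i + 1) 0 - 1) + 1) 1, WSet g r c rr cc)
    (fun m' _ hm' => shape_foldl g _ (fun m'' c hm'' => pySet2_shape g m'' r c hm'') _ m' hm')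
    (fun m' i rr cc hm' => cellv_foldl g _ (fun c rr cc => WSet g r c rr cc)
      (fun m'' c hm'' => pySet2_shape g m'' r c hm'')
      (fun m'' c rr cc hm'' => cellv_pySet2 g m'' r c rr cc hm'') _ m' rr cc hm')
    _ m r' c' h

theorem cellv_fillColGaps (g m : List (List Int)) (c : Int) (P : List Int) (r' c' : Nat)
    (h : ShapeEq g m) :
    cellv (fillColGaps c P m) r' c' = if WFillCol g c P r' c' then 2 else cellv m r' c' := by
  unfold fillColGaps
  exact cellv_foldl g _
    (fun i rr cc => ∃ r ∈ PySem.List.pyRange (PySem.List.pyGetD P i 0 + 1)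
        ((PySem.List.pyGetD P (i + 1) 0 - 1) + 1) 1, WSet g r c rr cc)
    (fun m' _ hm' => shape_foldl g _ (fun m'' r hm'' => pySet2_shape g m'' r c hm'') _ m' hm')
    (fun m' i rr cc hm' => cellv_foldl g _ (fun r rr cc => WSet g r c rr cc)
      (fun m'' r hm'' => pySet2_shape g m'' r c hm'')
      (fun m'' r rr cc hm'' => cellv_pySet2 g m'' r c rr cc hm'') _ m' rr cc hm')
    _ m r' c' h

theorem hor_shape (g : List (List Int)) :
    ShapeEq g ((PySem.List.pyRange 0 (g.length : Int) 1).foldl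
      (fun output r => fillRowGaps r (posRow g ((g.headD []).length : Int) r) output)
      (g.map (fun row => row))) := by
  have : g.map (fun row => row) = g := by simp
  rw [this]
  exact shape_foldl g _ (fun m r hm => fillRowGaps_shape g m r _ hm) _ g (shapeEq_refl g)

theorem transform_shape (g : List (List Int)) (h : ¬(g = [] ∨ g.headD [] = [])) :
    ShapeEq g (transform g) := by
  unfold transform
  rw [if_neg h]
  exact shape_foldl g _ (fun m c hm => fillColGaps_shape g m c _ hm) _ _ (hor_shape g)

theorem cellv_transform (g : List (List Int)) (h : ¬(g = [] ∨ g.headD [] = []))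
    (r' c' : Nat) :
    cellv (transform g) r' c' =
      if CAv g r' c' then 2 else if CAh g r' c' then 2 else cellv g r' c' := by
  unfold transform
  rw [if_neg h]
  rw [cellv_foldl g _
    (fun c rr cc => WFillCol g c (posCol g (g.length : Int) c) rr cc)
    (fun m c hm => fillColGaps_shape g m c _ hm)
    (fun m c rr cc hm => cellv_fillColGaps g m c _ rr cc hm) _ _ r' c' (hor_shape g)]
  have hmap : g.map (fun row => row) = g := by simp
  rw [hmap]
  rw [cellv_foldl g _
    (fun r rr cc => WFillRow g r (posRow g ((g.headD []).length : Int) r) rr cc)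
    (fun m r hm => fillRowGaps_shape g m r _ hm)
    (fun m r rr cc hm => cellv_fillRowGaps g m r _ rr cc hm) _ g r' c' (shapeEq_refl g)]

-- ===== B-side characterization =====

theorem length_foldl_condset (cond : Int → Prop) [DecidablePred cond] (L : List Int) :
    ∀ row : List Int,
      (L.foldl (fun new c => if cond c then new.set c.toNat 2 else new) row).length
        = row.length := by
  induction L with
  | nil => intro row; rfl
  | cons c L ih =>
    intro row
    rw [List.foldl_cons, ih]
    split_ifs <;> simp

theorem getD_foldl_condset (cond : Int → Prop) [DecidablePred cond] (L : List Int) :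
    ∀ (row : List Int) (c' : Nat),
      (L.foldl (fun new c => if cond c then new.set c.toNat 2 else new) row).getD c' 0
        = if ∃ c ∈ L, cond c ∧ c' = c.toNat ∧ c.toNat < row.length then 2
          else row.getD c' 0 := by
  induction L with
  | nil => intro row c'; simp
  | cons c L ih =>
    intro row c'
    rw [List.foldl_cons, ih]
    have hlen : (if cond c then row.set c.toNat 2 else row).length = row.length := by
      split_ifs <;> simp
    rw [hlen]
    have hexp : (∃ cc ∈ c :: L, cond cc ∧ c' = cc.toNat ∧ cc.toNat < row.length) ↔
        ((cond c ∧ c' = c.toNat ∧ c.toNat < row.length) ∨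
          ∃ cc ∈ L, cond cc ∧ c' = cc.toNat ∧ cc.toNat < row.length) := by
      simp [List.mem_cons]
    rw [if_congr hexp rfl rfl]
    by_cases hc : cond c
    · rw [if_pos hc, getD_set]
      by_cases hex : ∃ cc ∈ L, cond cc ∧ c' = cc.toNat ∧ cc.toNat < row.length
      · simp [hex]
      · rw [if_neg hex]
        by_cases hcc : c' = c.toNat ∧ c.toNat < row.length
        · rw [if_pos hcc, if_pos (Or.inl ⟨hc, hcc.1, hcc.2⟩)]
        · rw [if_neg hcc, if_neg (fun h => h.elim (fun h1 => hcc ⟨h1.2.1, h1.2.2⟩) hex)]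
    · rw [if_neg hc]
      have : ¬(cond c ∧ c' = c.toNat ∧ c.toNat < row.length) := fun h => hc h.1
      simp [this]

theorem length_fillCellsB (r : Int) (row : List Int) (rowSpan colSpan : List (Option (Int × Int)))
    (cols : Int) : (fillCellsB r row rowSpan colSpan cols).length = row.length :=
  length_foldl_condset _ _ row

theorem getD_fillCellsB (r : Int) (row : List Int) (rowSpan colSpan : List (Option (Int × Int)))
    (cols : Int) (c' : Nat) :
    (fillCellsB r row rowSpan colSpan cols).getD c' 0 =
      if ∃ c ∈ PySem.List.pyRange 0 cols 1,
          (PySem.List.pyGetD row c 0 ≠ 1 ∧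
            (betweenB (PySem.List.pyGetD rowSpan r none) c ∨
             betweenB (PySem.List.pyGetD colSpan c none) r)) ∧
          c' = c.toNat ∧ c.toNat < row.length then 2
      else row.getD c' 0 :=
  getD_foldl_condset _ _ row c'

-- ===== the combinatorial core: gaps between consecutive 1s = strictly inside the span, not a 1 =====

theorem sorted_ge_head (q : Int) (rest : List Int) (h : (q :: rest).Pairwise (· < ·)) :
    ∀ y ∈ q :: rest, q ≤ y := by
  intro y hy
  rcases List.mem_cons.mp hy with h1 | h2
  · omega
  · exact le_of_lt ((List.pairwise_cons.mp h).1 y h2)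

theorem between_consec : ∀ (P : List Int), P.Pairwise (· < ·) → ∀ x : Int,
    ((∃ i : Nat, i + 1 < P.length ∧ P.getD i 0 < x ∧ x < P.getD (i + 1) 0) ↔
     (P ≠ [] ∧ P.getD 0 0 < x ∧ x < P.getLastD 0 ∧ x ∉ P)) := by
  intro P
  induction P with
  | nil => intro _ x; simp
  | cons p rest ih =>
    intro hs x
    match rest with
    | [] =>
      constructor
      · rintro ⟨i, hi, -⟩; simp at hi
      · rintro ⟨-, h1, h2, -⟩; simp [List.getLastD] at h1 h2; omega
    | q :: rest' =>
      have hpq : p < q := (List.pairwise_cons.mp hs).1 q (by simp)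
      have hrest : (q :: rest').Pairwise (· < ·) := (List.pairwise_cons.mp hs).2
      have hge : ∀ y ∈ q :: rest', q ≤ y := sorted_ge_head q rest' hrest
      have hlast : (p :: q :: rest').getLastD 0 = (q :: rest').getLastD 0 := by
        simp [List.getLastD_eq_getLast?]
      have hlastmem : (q :: rest').getLastD 0 ∈ q :: rest' := by
        simp only [List.getLastD_eq_getLast?,
          List.getLast?_eq_some_getLast (l := q :: rest') (by simp), Option.getD_some]
        exact List.getLast_mem _
      have hiff : (∃ i : Nat, i + 1 < (p :: q :: rest').length ∧
            (p :: q :: rest').getD i 0 < x ∧ x < (p :: q :: rest').getD (i + 1) 0)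
          ↔ ((p < x ∧ x < q) ∨ ∃ i : Nat, i + 1 < (q :: rest').length ∧
            (q :: rest').getD i 0 < x ∧ x < (q :: rest').getD (i + 1) 0) := by
        constructor
        · rintro ⟨i, hi, h1, h2⟩
          cases i with
          | zero => exact Or.inl ⟨by simpa using h1, by simpa using h2⟩
          | succ j => exact Or.inr ⟨j, by simpa using hi, by simpa using h1, by simpa using h2⟩
        · rintro (⟨h1, h2⟩ | ⟨j, hj, h1, h2⟩)
          · exact ⟨0, by simp, by simpa, by simpa⟩
          · exact ⟨j + 1, by simpa using hj, by simpa using h1, by simpa using h2⟩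
      rw [hiff, ih hrest x]
      have hxl : q ≤ (q :: rest').getLastD 0 := hge _ hlastmem
      have hge' : ∀ y ∈ rest', q ≤ y := fun y hy => hge y (by simp [hy])
      simp only [ne_eq, reduceCtorEq, not_false_eq_true, true_and, List.getD_cons_zero, hlast,
        List.mem_cons, not_or]
      constructor
      · rintro (⟨h1, h2⟩ | ⟨h1, h2, h3, h4⟩)
        · exact ⟨h1, by omega, by omega, by omega, fun hmem => by have := hge' x hmem; omega⟩
        · exact ⟨by omega, h2, by omega, h3, h4⟩
      · rintro ⟨h1, h2, h3, h4, h5⟩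
        by_cases hq : x < q
        · exact Or.inl ⟨h1, hq⟩
        · exact Or.inr ⟨by omega, h2, h4, h5⟩


theorem getD_mem_of_lt (P : List Int) (i : Nat) (h : i < P.length) : P.getD i 0 ∈ P := by
  rw [List.getD_eq_getElem _ _ h]
  exact List.getElem_mem h

theorem pairwise_onesRow (row : List Int) (cols : Int) : (onesRow row cols).Pairwise (· < ·) :=
  List.Pairwise.filter _ (PySem.List.pairwise_lt_pyRange_one 0 cols)

theorem mem_onesRow (row : List Int) (cols x : Int) :
    x ∈ onesRow row cols ↔ 0 ≤ x ∧ x < cols ∧ PySem.List.pyGetD row x 0 = 1 := by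
  simp [onesRow, List.mem_filter, PySem.List.mem_pyRange_one, and_assoc]

theorem pairwise_posCol (g : List (List Int)) (rows c : Int) :
    (posCol g rows c).Pairwise (· < ·) :=
  List.Pairwise.filter _ (PySem.List.pairwise_lt_pyRange_one 0 rows)

theorem mem_posCol (g : List (List Int)) (rows c x : Int) :
    x ∈ posCol g rows c ↔
      0 ≤ x ∧ x < rows ∧ PySem.List.pyGetD (PySem.List.pyGetD g x []) c 0 = 1 := by
  simp [posCol, List.mem_filter, PySem.List.mem_pyRange_one, and_assoc]

theorem posRow_natCast (g : List (List Int)) (cols : Int) (r' : Nat) :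
    posRow g cols (r' : Int) = onesRow (g.getD r' []) cols := by
  simp [posRow]

theorem betweenB_spanB (P : List Int) (x : Int) :
    betweenB (spanB P) x = true ↔ (P ≠ [] ∧ P.getD 0 0 < x ∧ x < P.getLastD 0) := by
  unfold betweenB spanB
  split_ifs with h
  · simp [h]
  · simp [PySem.List.pyGetD_zero, PySem.List.pyGetD_neg_one _ _ h,
      List.getLastD_eq_getLast?, List.getLast?_eq_some_getLast h, h]

theorem CAh_iff (g : List (List Int)) (pre : Pre_transform g) (r' c' : Nat)
    (hr : r' < g.length) :
    CAh g r' c' ↔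
      ∃ i : Nat, i + 1 < (onesRow (g.getD r' []) ((g.headD []).length : Int)).length ∧
        (onesRow (g.getD r' []) ((g.headD []).length : Int)).getD i 0 < (c' : Int) ∧
        (c' : Int) < (onesRow (g.getD r' []) ((g.headD []).length : Int)).getD (i + 1) 0 := by
  unfold CAh WFillRow WSet
  constructor
  · rintro ⟨r, hrmem, i, himem, c, hcmem, h1, h2, h3, h4⟩
    rw [PySem.List.mem_pyRange_one] at hrmem himem hcmem
    have hre : r = (r' : Int) := by omega
    subst hre
    rw [posRow_natCast] at himem hcmem
    have hiN : i = (i.toNat : Int) := by omega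
    have hiN1 : i + 1 = ((i.toNat + 1 : Nat) : Int) := by omega
    rw [hiN, PySem.List.pyGetD_natCast,
      show ((i.toNat : Int) + 1) = ((i.toNat + 1 : Nat) : Int) by push_cast; ring,
      PySem.List.pyGetD_natCast] at hcmem
    have hmem : (onesRow (g.getD r' []) ((g.headD []).length : Int)).getD i.toNat 0
        ∈ onesRow (g.getD r' []) ((g.headD []).length : Int) := by
      apply getD_mem_of_lt
      omega
    have h0 : 0 ≤ (onesRow (g.getD r' []) ((g.headD []).length : Int)).getD i.toNat 0 :=
      ((mem_onesRow _ _ _).mp hmem).1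
    have hc0 : (c' : Int) = c := by omega
    refine ⟨i.toNat, by omega, by omega, by omega⟩
  · rintro ⟨iN, hlen, h1, h2⟩
    have hmem2 : (onesRow (g.getD r' []) ((g.headD []).length : Int)).getD (iN + 1) 0
        ∈ onesRow (g.getD r' []) ((g.headD []).length : Int) := getD_mem_of_lt _ _ hlen
    have hb2 := (mem_onesRow _ _ _).mp hmem2
    have hrow : g.getD r' [] ∈ g := by
      rw [List.getD_eq_getElem g [] hr]
      exact List.getElem_mem hr
    have hlenrow : (g.headD []).length ≤ (g.getD r' []).length := pre _ hrow
    refine ⟨(r' : Int), ?_, (iN : Int), ?_, (c' : Int), ?_, ?_, ?_, ?_, ?_⟩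
    · rw [PySem.List.mem_pyRange_one]
      constructor
      · omega
      · exact_mod_cast hr
    · rw [posRow_natCast, PySem.List.mem_pyRange_one]
      constructor
      · omega
      · omega
    · rw [posRow_natCast, PySem.List.mem_pyRange_one, PySem.List.pyGetD_natCast,
        show ((iN : Int) + 1) = ((iN + 1 : Nat) : Int) by push_cast; ring,
        PySem.List.pyGetD_natCast]
      omega
    · simp
    · simp
    · simpa using hr
    · simp only [Int.toNat_natCast]
      omega

theorem CAv_iff (g : List (List Int)) (pre : Pre_transform g) (r' c' : Nat)
    (hr : r' < g.length) :
    CAv g r' c' ↔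
      c' < (g.headD []).length ∧
        ∃ i : Nat, i + 1 < (posCol g (g.length : Int) (c' : Int)).length ∧
          (posCol g (g.length : Int) (c' : Int)).getD i 0 < (r' : Int) ∧
          (r' : Int) < (posCol g (g.length : Int) (c' : Int)).getD (i + 1) 0 := by
  unfold CAv WFillCol WSet
  constructor
  · rintro ⟨c, hcmem, i, himem, r, hrmem, h1, h2, h3, h4⟩
    rw [PySem.List.mem_pyRange_one] at hcmem himem hrmem
    have hce : c = (c' : Int) := by omega
    subst hce
    have hiN : i = (i.toNat : Int) := by omega
    have hiN1 : i + 1 = ((i.toNat + 1 : Nat) : Int) := by omega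
    rw [hiN, PySem.List.pyGetD_natCast,
      show ((i.toNat : Int) + 1) = ((i.toNat + 1 : Nat) : Int) by push_cast; ring,
      PySem.List.pyGetD_natCast] at hrmem
    have hmem : (posCol g (g.length : Int) (c' : Int)).getD i.toNat 0
        ∈ posCol g (g.length : Int) (c' : Int) := by
      apply getD_mem_of_lt
      omega
    have h0 : 0 ≤ (posCol g (g.length : Int) (c' : Int)).getD i.toNat 0 :=
      ((mem_posCol _ _ _ _).mp hmem).1
    have hr0 : (r' : Int) = r := by omega
    exact ⟨by omega, i.toNat, by omega, by omega, by omega⟩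
  · rintro ⟨hcc, iN, hlen, h1, h2⟩
    have hmem1 : (posCol g (g.length : Int) (c' : Int)).getD iN 0
        ∈ posCol g (g.length : Int) (c' : Int) := getD_mem_of_lt _ _ (by omega)
    have hmem2 : (posCol g (g.length : Int) (c' : Int)).getD (iN + 1) 0
        ∈ posCol g (g.length : Int) (c' : Int) := getD_mem_of_lt _ _ hlen
    have hb1 := (mem_posCol _ _ _ _).mp hmem1
    have hb2 := (mem_posCol _ _ _ _).mp hmem2
    have hrow : g.getD r' [] ∈ g := by
      rw [List.getD_eq_getElem g [] hr]
      exact List.getElem_mem hr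
    have hlenrow : (g.headD []).length ≤ (g.getD r' []).length := pre _ hrow
    refine ⟨(c' : Int), ?_, (iN : Int), ?_, (r' : Int), ?_, ?_, ?_, ?_, ?_⟩
    · rw [PySem.List.mem_pyRange_one]
      constructor
      · omega
      · exact_mod_cast hcc
    · rw [PySem.List.mem_pyRange_one]
      constructor
      · omega
      · omega
    · rw [PySem.List.mem_pyRange_one, PySem.List.pyGetD_natCast,
        show ((iN : Int) + 1) = ((iN + 1 : Nat) : Int) by push_cast; ring,
        PySem.List.pyGetD_natCast]
      omega
    · simp
    · simp
    · simpa using hr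
    · simp only [Int.toNat_natCast]
      omega

theorem transform_alt_eq (g : List (List Int)) (h : ¬(g = [] ∨ g.headD [] = [])) :
    transform_alt g = (PySem.List.enumerate g).map (fun p =>
      fillCellsB p.1 p.2 (g.map (fun row => spanB (onesRow row ((g.headD []).length : Int))))
        ((PySem.List.pyRange 0 ((g.headD []).length : Int) 1).map
          (fun c => spanB (posCol g (g.length : Int) c)))
        ((g.headD []).length : Int)) := by
  unfold transform_alt
  rw [if_neg h]

theorem length_transform_alt (g : List (List Int)) (h : ¬(g = [] ∨ g.headD [] = [])) :
    (transform_alt g).length = g.length := by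
  rw [transform_alt_eq g h]
  simp [PySem.List.length_enumerate]

theorem getElem_transform_alt (g : List (List Int)) (h : ¬(g = [] ∨ g.headD [] = []))
    (r' : Nat) (hr : r' < g.length) :
    (transform_alt g)[r']'(by rw [length_transform_alt g h]; exact hr) =
      fillCellsB (r' : Nat) (g.getD r' [])
        (g.map (fun row => spanB (onesRow row ((g.headD []).length : Int))))
        ((PySem.List.pyRange 0 ((g.headD []).length : Int) 1).map
          (fun c => spanB (posCol g (g.length : Int) c)))
        ((g.headD []).length : Int) := by
  have he := transform_alt_eq g h
  have hlen : r' < ((PySem.List.enumerate g).map (fun p =>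
      fillCellsB p.1 p.2 (g.map (fun row => spanB (onesRow row ((g.headD []).length : Int))))
        ((PySem.List.pyRange 0 ((g.headD []).length : Int) 1).map
          (fun c => spanB (posCol g (g.length : Int) c)))
        ((g.headD []).length : Int))).length := by
    simpa [PySem.List.length_enumerate] using hr
  simp only [he, List.getElem_map, PySem.List.getElem_enumerate g 0 r'
    (by simpa [PySem.List.length_enumerate] using hr)]
  rw [List.getD_eq_getElem g [] hr]
  norm_num

theorem main_iff (g : List (List Int)) (pre : Pre_transform g) (r' c' : Nat)
    (hr : r' < g.length) :
    (CAv g r' c' ∨ CAh g r' c') ↔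
      (∃ c ∈ PySem.List.pyRange 0 ((g.headD []).length : Int) 1,
        (PySem.List.pyGetD (g.getD r' []) c 0 ≠ 1 ∧
          (betweenB (PySem.List.pyGetD
              (g.map fun row => spanB (onesRow row ((g.headD []).length : Int)))
              (r' : Int) none) c = true ∨
           betweenB (PySem.List.pyGetD
              ((PySem.List.pyRange 0 ((g.headD []).length : Int) 1).map
                fun c => spanB (posCol g (g.length : Int) c)) c none) (r' : Int) = true)) ∧
        c' = c.toNat ∧ c.toNat < (g.getD r' []).length) := by
  have hrow : g.getD r' [] ∈ g := by
    rw [List.getD_eq_getElem g [] hr]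
    exact List.getElem_mem hr
  have hlr : (g.headD []).length ≤ (g.getD r' []).length := pre _ hrow
  have hspanR : PySem.List.pyGetD
      (g.map fun row => spanB (onesRow row ((g.headD []).length : Int))) (r' : Int) none
      = spanB (onesRow (g.getD r' []) ((g.headD []).length : Int)) := by
    rw [PySem.List.pyGetD_natCast, List.getD_eq_getElem _ _ (by simpa using hr),
      List.getElem_map, List.getD_eq_getElem g [] hr]
  have hRHS : (∃ c ∈ PySem.List.pyRange 0 ((g.headD []).length : Int) 1,
        (PySem.List.pyGetD (g.getD r' []) c 0 ≠ 1 ∧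
          (betweenB (PySem.List.pyGetD
              (g.map fun row => spanB (onesRow row ((g.headD []).length : Int)))
              (r' : Int) none) c = true ∨
           betweenB (PySem.List.pyGetD
              ((PySem.List.pyRange 0 ((g.headD []).length : Int) 1).map
                fun c => spanB (posCol g (g.length : Int) c)) c none) (r' : Int) = true)) ∧
        c' = c.toNat ∧ c.toNat < (g.getD r' []).length) ↔
      (c' < (g.headD []).length ∧ (g.getD r' []).getD c' 0 ≠ 1 ∧
        (betweenB (spanB (onesRow (g.getD r' []) ((g.headD []).length : Int))) (c' : Int) = true ∨
         betweenB (spanB (posCol g (g.length : Int) (c' : Int))) (r' : Int) = true)) := by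
    constructor
    · rintro ⟨c, hcmem, ⟨hv, hb⟩, hceq, -⟩
      rw [PySem.List.mem_pyRange_one] at hcmem
      have hce : c = (c' : Int) := by omega
      subst hce
      rw [hspanR] at hb
      rw [PySem.List.pyGetD_map_pyRange_of_nonneg _ _ _ _ hcmem.1 hcmem.2] at hb
      rw [PySem.List.pyGetD_natCast] at hv
      exact ⟨by omega, hv, hb⟩
    · rintro ⟨hcc, hv, hb⟩
      refine ⟨(c' : Int), ?_, ⟨?_, ?_⟩, by simp, ?_⟩
      · rw [PySem.List.mem_pyRange_one]
        omega
      · rw [PySem.List.pyGetD_natCast]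
        exact hv
      · rw [hspanR, PySem.List.pyGetD_map_pyRange_of_nonneg _ _ _ _ (by omega) (by omega)]
        exact hb
      · simp only [Int.toNat_natCast]
        omega
  rw [hRHS, betweenB_spanB, betweenB_spanB,
    CAh_iff g pre r' c' hr, CAv_iff g pre r' c' hr,
    between_consec _ (pairwise_onesRow (g.getD r' []) ((g.headD []).length : Int)) (c' : Int),
    between_consec _ (pairwise_posCol g (g.length : Int) (c' : Int)) (r' : Int)]
  have hmemP : ((c' : Int) ∈ onesRow (g.getD r' []) ((g.headD []).length : Int)) ↔
      (c' < (g.headD []).length ∧ (g.getD r' []).getD c' 0 = 1) := by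
    rw [mem_onesRow, PySem.List.pyGetD_natCast]
    constructor
    · rintro ⟨-, h1, h2⟩; exact ⟨by omega, h2⟩
    · rintro ⟨h1, h2⟩; exact ⟨by omega, by omega, h2⟩
  have hmemQ : ((r' : Int) ∈ posCol g (g.length : Int) (c' : Int)) ↔
      ((g.getD r' []).getD c' 0 = 1) := by
    rw [mem_posCol, PySem.List.pyGetD_natCast, PySem.List.pyGetD_natCast]
    constructor
    · rintro ⟨-, -, h2⟩; exact h2
    · intro h2; exact ⟨by omega, by exact_mod_cast hr, h2⟩
  have hPlast : onesRow (g.getD r' []) ((g.headD []).length : Int) ≠ [] →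
      (onesRow (g.getD r' []) ((g.headD []).length : Int)).getLastD 0 <
        ((g.headD []).length : Int) := by
    intro hne
    have : (onesRow (g.getD r' []) ((g.headD []).length : Int)).getLastD 0 ∈
        onesRow (g.getD r' []) ((g.headD []).length : Int) := by
      simp only [List.getLastD_eq_getLast?, List.getLast?_eq_some_getLast hne, Option.getD_some]
      exact List.getLast_mem _
    exact ((mem_onesRow _ _ _).mp this).2.1
  rw [hmemP, hmemQ]
  constructor
  · rintro (⟨hcc, h1, h2, h3, h4⟩ | ⟨h1, h2, h3, h4⟩)
    · exact ⟨hcc, fun hv => h4 hv, Or.inr ⟨h1, h2, h3⟩⟩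
    · have hcc : c' < (g.headD []).length := by
        have := hPlast h1
        omega
      refine ⟨hcc, fun hv => h4 ⟨hcc, hv⟩, Or.inl ⟨h1, h2, h3⟩⟩
  · rintro ⟨hcc, hv, hP | hQ⟩
    · exact Or.inr ⟨hP.1, hP.2.1, hP.2.2, fun hm => hv hm.2⟩
    · exact Or.inl ⟨hcc, hQ.1, hQ.2.1, hQ.2.2, hv⟩

-- ===== VERDICT (by name: the statement is the Claim_ definition above) =====
theorem transform_spec : Claim_equal_transform := by
  unfold Claim_equal_transform Spec_transform
  intro g _dom pre
  by_cases hne : g = [] ∨ g.headD [] = []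
  · unfold transform transform_alt
    rw [if_pos hne, if_pos hne]
  · have hshape := transform_shape g hne
    apply List.ext_getElem
    · rw [hshape.1, length_transform_alt g hne]
    intro r' h1 h2
    have hr : r' < g.length := by rw [← hshape.1]; exact h1
    have hrowlenA : ((transform g).getD r' []).length = (g.getD r' []).length := hshape.2 r'
    rw [getElem_transform_alt g hne r' hr]
    apply List.ext_getElem
    · rw [length_fillCellsB, ← List.getD_eq_getElem _ [] h1, hrowlenA]
    intro c' hc1 hc2
    have hcA : c' < (g.getD r' []).length := by
      rw [← hrowlenA, List.getD_eq_getElem _ [] h1]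
      exact hc1
    have hlhs : ((transform g)[r']'h1)[c']'hc1 = cellv (transform g) r' c' := by
      rw [cellv, List.getD_eq_getElem _ [] h1, List.getD_eq_getElem _ 0 hc1]
    have hrhs : (fillCellsB (r' : Nat) (g.getD r' [])
        (g.map (fun row => spanB (onesRow row ((g.headD []).length : Int))))
        ((PySem.List.pyRange 0 ((g.headD []).length : Int) 1).map
          (fun c => spanB (posCol g (g.length : Int) c)))
        ((g.headD []).length : Int))[c']'hc2 =
        (fillCellsB (r' : Nat) (g.getD r' [])
        (g.map (fun row => spanB (onesRow row ((g.headD []).length : Int))))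
        ((PySem.List.pyRange 0 ((g.headD []).length : Int) 1).map
          (fun c => spanB (posCol g (g.length : Int) c)))
        ((g.headD []).length : Int)).getD c' 0 := by
      rw [List.getD_eq_getElem _ 0 hc2]
    rw [hlhs, hrhs, getD_fillCellsB, cellv_transform g hne r' c']
    have hiff := main_iff g pre r' c' hr
    by_cases hA : CAv g r' c' ∨ CAh g r' c'
    · have hB := hiff.mp hA
      rw [if_pos hB]
      rcases hA with h | h
      · rw [if_pos h]
      · by_cases hv : CAv g r' c'
        · rw [if_pos hv]
        · rw [if_neg hv, if_pos h]
    · have hB := fun h => hA (hiff.mpr h)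
      rw [if_neg hB, if_neg (fun h => hA (Or.inl h)), if_neg (fun h => hA (Or.inr h))]
      rfl
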